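-- pv_equiv track=rewrite | github.com/StephenD1981/radcom-detectors | ran_optimizer/recommendations/pci_planner.py | build_union_find_groups
-- ===== SOURCE A (Python) =====
-- from typing import Dict, List, Tuple, Set, Optional, Any
--
-- def build_union_find_groups(pairs: List[Tuple[str, str]]) -> Tuple[Dict[str, int], Dict[int, Set[str]]]:
--     """
--     Union-Find algorithm to create co-sector groups from cell pairs.
--
--     Uses iterative path compression to avoid recursion depth issues.
--
--     Returns:
--         - cell_to_gid: Maps each cell to its group ID
--         - gid_to_members: Maps group ID to set of member cells
--     """
--     parent: Dict[str, str] = {}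
--
--     def find(x: str) -> str:
--         """Find root with iterative path compression."""
--         if x not in parent:
--             parent[x] = x
--         # Find root (iterative)
--         root = x
--         while parent[root] != root:
--             root = parent[root]
--         # Path compression (iterative) - point all nodes to root
--         while parent[x] != root:
--             next_x = parent[x]
--             parent[x] = root
--             x = next_x
--         return root
--
--     def union(a: str, b: str) -> None:
--         ra, rb = find(a), find(b)
--         if ra != rb:
--             parent[rb] = ra
--
--     # Build groups
--     for a, b in pairs:
--         union(a, b)
--
--     # Assign compact group IDs
--     root_to_gid: Dict[str, int] = {}
--     cell_to_gid: Dict[str, int] = {}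
--     gid_to_members: Dict[int, Set[str]] = {}
--
--     gid = 0
--     for c in list(parent.keys()):
--         r = find(c)
--         if r not in root_to_gid:
--             root_to_gid[r] = gid
--             gid += 1
--         g = root_to_gid[r]
--         cell_to_gid[c] = g
--         gid_to_members.setdefault(g, set()).add(c)
--
--     return cell_to_gid, gid_to_members
-- ===== SOURCE B (Python) =====
-- from typing import Dict, List, Tuple, Set
--
-- def build_union_find_groups(pairs: List[Tuple[str, str]]) -> Tuple[Dict[str, int], Dict[int, Set[str]]]:
--     """Quick-find (eager relabelling) instead of a union-find forest: each cell
--     carries its group leader directly; a union relabels the smaller-is-irrelevant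
--     whole losing group in one sweep, so no find/path-compression machinery is needed."""
--     leader: Dict[str, str] = {}
--     for a, b in pairs:
--         la = leader.setdefault(a, a)
--         lb = leader.setdefault(b, b)
--         if la != lb:
--             leader = {k: (la if v == lb else v) for k, v in leader.items()}
--     root_to_gid: Dict[str, int] = {}
--     cell_to_gid: Dict[str, int] = {}
--     gid_to_members: Dict[int, Set[str]] = {}
--     gid = 0
--     for c, r in leader.items():
--         if r not in root_to_gid:
--             root_to_gid[r] = gid
--             gid += 1
--         g = root_to_gid[r]
--         cell_to_gid[c] = g
--         gid_to_members.setdefault(g, set()).add(c)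
--     return cell_to_gid, gid_to_members
-- ===== Notes on version B (the rewrite author's own statement) =====
-- stated objective: simpler
-- what changed: Replaces the union-find forest (parent pointers with find and iterative path compression) by a flat quick-find leader map: each cell stores its group leader directly, a union relabels the losing group's cells in one dict comprehension, and the final gid pass reads leaders straight off the dict instead of calling find again.
import Mathlib
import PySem

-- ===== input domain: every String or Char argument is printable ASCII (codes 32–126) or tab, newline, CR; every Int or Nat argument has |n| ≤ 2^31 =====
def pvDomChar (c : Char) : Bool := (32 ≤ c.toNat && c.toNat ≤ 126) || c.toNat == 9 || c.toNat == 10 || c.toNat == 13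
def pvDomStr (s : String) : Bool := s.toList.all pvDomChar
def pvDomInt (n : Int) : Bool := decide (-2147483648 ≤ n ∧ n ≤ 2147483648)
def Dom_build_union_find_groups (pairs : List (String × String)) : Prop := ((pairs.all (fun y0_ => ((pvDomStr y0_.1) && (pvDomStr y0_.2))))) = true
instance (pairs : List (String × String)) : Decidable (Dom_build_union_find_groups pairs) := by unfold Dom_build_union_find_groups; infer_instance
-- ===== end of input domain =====

-- B replaces the union-find forest (find with iterative path compression) by a flat
-- quick-find leader map relabelled eagerly at each union: simpler, no find machinery.

-- ===== PORT A =====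
-- 'while parent[root] != root: root = parent[root]'.  parent[root] is ported as getD root root
-- (exact: the loop only ever looks up keys present in the dict); the fuel p.keys.length is
-- enough for any chain of distinct keys, so the loop is a faithful transliteration.
def pvFindRootLoop (p : PySem.Dict String String) (fuel : Nat) (root : String) : String :=
  match fuel with
  | 0 => root
  | f + 1 => if p.getD root root = root then root else pvFindRootLoop p f (p.getD root root)

-- 'while parent[x] != root: next_x = parent[x]; parent[x] = root; x = next_x'
def pvCompressLoop (p : PySem.Dict String String) (fuel : Nat) (x root : String) :
    PySem.Dict String String :=
  match fuel with
  | 0 => p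
  | f + 1 =>
    if p.getD x x = root then p
    else pvCompressLoop (p.insert x root) f (p.getD x x) root

-- def find(x): inserts x if absent, finds the root, compresses the path, returns (parent, root)
def pvFind (p : PySem.Dict String String) (x : String) :
    (PySem.Dict String String) × String :=
  let p1 := if p.contains x then p else p.insert x x
  let root := pvFindRootLoop p1 p1.keys.length x
  (pvCompressLoop p1 p1.keys.length x root, root)

-- def union(a, b)
def pvUnion (p : PySem.Dict String String) (a b : String) : PySem.Dict String String :=
  let fa := pvFind p a
  let fb := pvFind fa.1 b
  if fa.2 ≠ fb.2 then fb.1.insert fb.2 fa.2 else fb.1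

-- body of A's second loop ('for c in list(parent.keys())'); the running parent is part of the state
def pvAssignA
    (st : (PySem.Dict String String) × (PySem.Dict String Int) × (PySem.Dict String Int) ×
          (PySem.Dict Int (PySem.Set String)) × Int) (c : String) :
    (PySem.Dict String String) × (PySem.Dict String Int) × (PySem.Dict String Int) ×
          (PySem.Dict Int (PySem.Set String)) × Int :=
  let (p, r2g, c2g, g2m, gid) := st
  let fr := pvFind p c
  let r := fr.2
  let r2g' := if r2g.contains r then r2g else r2g.insert r gid
  let gid' := if r2g.contains r then gid else gid + 1
  let g := r2g'.getD r 0       -- root_to_gid[r]: the key was just ensured, getD is exact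
  (fr.1, r2g', c2g.insert c g, g2m.modify g PySem.Set.empty (fun s => PySem.Set.add s c), gid')

def build_union_find_groups (pairs : List (String × String)) :
    (List (String × Int)) × (List (Int × List String)) :=
  let pf := pairs.foldl (fun p ab => pvUnion p ab.1 ab.2) PySem.Dict.empty
  let st := pf.keys.foldl pvAssignA (pf, PySem.Dict.empty, PySem.Dict.empty, PySem.Dict.empty, 0)
  (st.2.2.1.items, st.2.2.2.1.items)

-- ===== PORT B =====
-- one pair of B's first loop: setdefault both endpoints, then relabel the losing leader
def pvStepB (L : PySem.Dict String String) (a b : String) : PySem.Dict String String :=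
  let la := (L.get? a).getD a
  let L1 := L.setdefault a a
  let lb := (L1.get? b).getD b
  let L2 := L1.setdefault b b
  if la ≠ lb then
    -- {k: (la if v == lb else v) for k, v in leader.items()}
    (L2.items.map (fun kv => (kv.1, if kv.2 = lb then la else kv.2))).foldl
      (fun d kv => d.insert kv.1 kv.2) PySem.Dict.empty
  else L2

-- body of B's second loop ('for c, r in leader.items()'); no parent state needed
def pvAssignB
    (st : (PySem.Dict String Int) × (PySem.Dict String Int) ×
          (PySem.Dict Int (PySem.Set String)) × Int) (cr : String × String) :
    (PySem.Dict String Int) × (PySem.Dict String Int) ×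
          (PySem.Dict Int (PySem.Set String)) × Int :=
  let (r2g, c2g, g2m, gid) := st
  let r := cr.2
  let r2g' := if r2g.contains r then r2g else r2g.insert r gid
  let gid' := if r2g.contains r then gid else gid + 1
  let g := r2g'.getD r 0
  (r2g', c2g.insert cr.1 g, g2m.modify g PySem.Set.empty (fun s => PySem.Set.add s cr.1), gid')

def build_union_find_groups_alt (pairs : List (String × String)) :
    (List (String × Int)) × (List (Int × List String)) :=
  let Lf := pairs.foldl (fun L ab => pvStepB L ab.1 ab.2) PySem.Dict.empty
  let st := Lf.items.foldl pvAssignB (PySem.Dict.empty, PySem.Dict.empty, PySem.Dict.empty, 0)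
  (st.2.1.items, st.2.2.1.items)

-- ===== PRECONDITION & SPEC =====
def Spec_build_union_find_groups (pairs : List (String × String)) (out : (List (String × Int)) × (List (Int × List String))) : Prop := out = build_union_find_groups_alt pairs
instance (pairs : List (String × String)) (out : (List (String × Int)) × (List (Int × List String))) : Decidable (Spec_build_union_find_groups pairs out) := by unfold Spec_build_union_find_groups; infer_instance

-- ===== CLAIM (what is proved, stated in full; the proofs are below) =====
def Claim_equal_build_union_find_groups : Prop := ∀ (pairs : List (String × String)), Dom_build_union_find_groups pairs → Spec_build_union_find_groups pairs (build_union_find_groups pairs)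

-- ===== LEMMAS AND PROOFS =====

-- the parent-pointer step:  pvStep p x = parent.get(x, x)
def pvStep (p : PySem.Dict String String) (x : String) : String := p.getD x x

def pvIsRoot (p : PySem.Dict String String) (x : String) : Prop := pvStep p x = x

-- the root reached from x (fuel p.keys.length is always enough on a forest, see pvRootOf_isRoot)
def pvRootOf (p : PySem.Dict String String) (x : String) : String :=
  (pvStep p)^[p.keys.length] x

-- the forest invariant: values point at keys, and some rank strictly drops along non-loop edges
def pvForest (p : PySem.Dict String String) : Prop :=
  (∀ k v, p.get? k = some v → v ∈ p.keys) ∧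
  ∃ rank : String → ℕ, ∀ k v, p.get? k = some v → v ≠ k → rank v < rank k

theorem pvStep_of_get?_eq_some {p : PySem.Dict String String} {x v : String}
    (h : p.get? x = some v) : pvStep p x = v := by
  simp [pvStep, PySem.Dict.getD_of_get?_eq_some p x h]

theorem pvStep_of_not_mem {p : PySem.Dict String String} {x : String}
    (h : x ∉ p.keys) : pvStep p x = x := by
  simp [pvStep, PySem.Dict.getD_of_get?_eq_none p x ((PySem.Dict.get?_eq_none_iff_not_mem_keys p x).2 h)]

theorem not_isRoot_get? {p : PySem.Dict String String} {x : String}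
    (h : ¬ pvIsRoot p x) : p.get? x = some (pvStep p x) ∧ x ∈ p.keys := by
  rcases hg : p.get? x with _ | v
  · exact absurd (pvStep_of_not_mem ((PySem.Dict.get?_eq_none_iff_not_mem_keys p x).1 hg)) h
  · refine ⟨by rw [pvStep_of_get?_eq_some hg], ?_⟩
    exact PySem.Dict.mem_keys_of_mem_items p (PySem.Dict.mem_items_of_get?_eq_some p hg)

theorem pvFindRootLoop_eq_iterate (p : PySem.Dict String String) (n : Nat) (x : String) :
    pvFindRootLoop p n x = (pvStep p)^[n] x := by
  induction n generalizing x with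
  | zero => rfl
  | succ m ih =>
    rw [pvFindRootLoop, Function.iterate_succ_apply]
    by_cases h : p.getD x x = x
    · rw [if_pos h]
      have hx : pvStep p x = x := h
      rw [hx, Function.iterate_fixed hx]
    · rw [if_neg h, ih]
      rfl

theorem pvIsRoot_iterate {p : PySem.Dict String String} {r : String}
    (h : pvIsRoot p r) (n : Nat) : (pvStep p)^[n] r = r :=
  Function.iterate_fixed h n

theorem pvRootOf_isRoot {p : PySem.Dict String String} (h : pvForest p) (x : String) :
    pvIsRoot p (pvRootOf p x) := by
  obtain ⟨hcl, rank, hrank⟩ := h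
  by_contra hnr
  set n := p.keys.length with hn
  -- no iterate up to n is a root
  have hnone : ∀ i ≤ n, ¬ pvIsRoot p ((pvStep p)^[i] x) := by
    intro i hi hroot
    have : (pvStep p)^[n] x = (pvStep p)^[i] x := by
      have : n = (n - i) + i := by omega
      rw [this, Function.iterate_add_apply, pvIsRoot_iterate hroot]
    exact hnr (by rw [pvRootOf, ← hn, this]; exact hroot)
  have hmem : ∀ i ≤ n, (pvStep p)^[i] x ∈ p.keys := fun i hi =>
    (not_isRoot_get? (hnone i hi)).2
  have hstepdec : ∀ i < n, rank ((pvStep p)^[i+1] x) < rank ((pvStep p)^[i] x) := by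
    intro i hi
    obtain ⟨hg, _⟩ := not_isRoot_get? (hnone i (by omega))
    have hne : pvStep p ((pvStep p)^[i] x) ≠ (pvStep p)^[i] x := hnone i (by omega)
    rw [Function.iterate_succ_apply']
    exact hrank _ _ hg hne
  have hdec : ∀ i j, i < j → j ≤ n → rank ((pvStep p)^[j] x) < rank ((pvStep p)^[i] x) := by
    intro i j hij hj
    induction j with
    | zero => omega
    | succ m ih =>
      rcases Nat.lt_or_ge i m with hm | hm
      · exact lt_trans (hstepdec m (by omega)) (ih hm (by omega))
      · have : i = m := by omega
        subst this
        exact hstepdec i (by omega)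
  have hinj : Set.InjOn (fun i => (pvStep p)^[i] x) ↑(Finset.range (n+1)) := by
    intro i hi j hj hij
    by_contra hne
    rcases Nat.lt_or_ge i j with h | h
    · have := hdec i j h (Nat.lt_succ_iff.1 (Finset.mem_range.1 (Finset.mem_coe.1 hj)))
      rw [show ((fun i => (pvStep p)^[i] x) i : String) = (pvStep p)^[i] x from rfl,
        show ((fun i => (pvStep p)^[i] x) j : String) = (pvStep p)^[j] x from rfl] at hij
      rw [hij] at this; omega
    · have hji : j < i := by omega
      have := hdec j i hji (Nat.lt_succ_iff.1 (Finset.mem_range.1 (Finset.mem_coe.1 hi)))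
      rw [show ((fun i => (pvStep p)^[i] x) i : String) = (pvStep p)^[i] x from rfl,
        show ((fun i => (pvStep p)^[i] x) j : String) = (pvStep p)^[j] x from rfl] at hij
      rw [hij] at this; omega
  have hcard : (Finset.range (n+1)).card ≤ p.keys.toFinset.card := by
    exact Finset.card_le_card_of_injOn (fun i => (pvStep p)^[i] x)
      (fun i hi => List.mem_toFinset.2 (hmem i (Nat.lt_succ_iff.1 (Finset.mem_range.1 hi)))) hinj
  have h2 := List.toFinset_card_le p.keys
  rw [Finset.card_range] at hcard
  omega

theorem pvRootOf_reaches {p : PySem.Dict String String} (h : pvForest p) {x r : String} {n : Nat}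
    (hit : (pvStep p)^[n] x = r) (hr : pvIsRoot p r) : pvRootOf p x = r := by
  set m := p.keys.length with hm
  rcases Nat.lt_or_ge m n with hlt | hge
  · have : (pvStep p)^[n] x = (pvStep p)^[m] x := by
      rw [show n = (n - m) + m by omega, Function.iterate_add_apply]
      exact Function.iterate_fixed (pvRootOf_isRoot h x) (n - m)
    rw [← hit, this]; rfl
  · rw [pvRootOf, ← hm, show m = (m - n) + n by omega, Function.iterate_add_apply, hit,
      pvIsRoot_iterate hr]

theorem pvRootOf_step {p : PySem.Dict String String} (h : pvForest p) (x : String) :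
    pvRootOf p (pvStep p x) = pvRootOf p x := by
  have hr := pvRootOf_isRoot h x
  apply pvRootOf_reaches h (n := p.keys.length) _ hr
  rw [← Function.iterate_succ_apply, Function.iterate_succ_apply']
  exact hr

theorem pvRootOf_of_not_mem {p : PySem.Dict String String} {x : String} (h : x ∉ p.keys) :
    pvRootOf p x = x :=
  pvIsRoot_iterate (pvStep_of_not_mem h) _

theorem pvRootOf_of_isRoot {p : PySem.Dict String String} {x : String} (h : pvIsRoot p x) :
    pvRootOf p x = x :=
  pvIsRoot_iterate h _

theorem pvIterate_mem_keys {p : PySem.Dict String String}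
    (hcl : ∀ k v, p.get? k = some v → v ∈ p.keys) {x : String} (hx : x ∈ p.keys) (n : Nat) :
    (pvStep p)^[n] x ∈ p.keys := by
  induction n generalizing x with
  | zero => exact hx
  | succ m ih =>
    rw [Function.iterate_succ_apply]
    rcases hg : p.get? x with _ | v
    · rw [pvStep_of_not_mem ((PySem.Dict.get?_eq_none_iff_not_mem_keys p x).1 hg)]
      exact ih hx
    · rw [pvStep_of_get?_eq_some hg]
      exact ih (hcl _ _ hg)

theorem pvRootOf_mem_keys {p : PySem.Dict String String} (h : pvForest p) {x : String}
    (hx : x ∈ p.keys) : pvRootOf p x ∈ p.keys :=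
  pvIterate_mem_keys h.1 hx _

theorem pvStep_insert (p : PySem.Dict String String) (k v y : String) :
    pvStep (p.insert k v) y = if y = k then v else pvStep p y := by
  simp [pvStep, PySem.Dict.getD_insert]

theorem pvFresh_keys {p : PySem.Dict String String} {x : String} (hx : x ∉ p.keys) :
    (p.insert x x).keys = p.keys ++ [x] :=
  PySem.Dict.keys_insert_of_not_contains p x
    (by rcases hc : p.contains x with _ | _
        · rfl
        · exact absurd ((PySem.Dict.contains_iff_mem_keys p x).1 hc) hx)

theorem pvFresh_step {p : PySem.Dict String String} {x : String} (hx : x ∉ p.keys) :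
    pvStep (p.insert x x) = pvStep p := by
  funext y
  rw [pvStep_insert]
  split
  · next hy => rw [hy, pvStep_of_not_mem hx]
  · rfl

theorem pvFresh_forest {p : PySem.Dict String String} {x : String} (hx : x ∉ p.keys)
    (h : pvForest p) : pvForest (p.insert x x) := by
  obtain ⟨hcl, rank, hrank⟩ := h
  constructor
  · intro k v hg
    by_cases hk : k = x
    · subst hk
      rw [PySem.Dict.get?_insert_self] at hg
      cases hg
      simp [pvFresh_keys hx]
    · rw [PySem.Dict.get?_insert_of_ne p x hk] at hg
      simp [pvFresh_keys hx, hcl _ _ hg]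
  · refine ⟨rank, fun k v hg hne => ?_⟩
    by_cases hk : k = x
    · subst hk
      rw [PySem.Dict.get?_insert_self] at hg
      cases hg
      exact absurd rfl hne
    · exact hrank _ _ (by rwa [PySem.Dict.get?_insert_of_ne p x hk] at hg) hne

theorem pvFresh_rootOf {p : PySem.Dict String String} {x : String} (hx : x ∉ p.keys)
    (h : pvForest p) (y : String) : pvRootOf (p.insert x x) y = pvRootOf p y := by
  rw [pvRootOf, pvFresh_step hx, pvFresh_keys hx]
  rw [List.length_append, List.length_singleton, Function.iterate_succ_apply']
  exact pvRootOf_isRoot h y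

-- pointing one non-root on-path node straight at its root
theorem pvCompress_step {p : PySem.Dict String String} {x root : String} (h : pvForest p)
    (hx : x ∈ p.keys) (hroot : pvRootOf p x = root) (hne : pvStep p x ≠ root) :
    (p.insert x root).keys = p.keys ∧ pvForest (p.insert x root) ∧
      (∀ y, pvRootOf (p.insert x root) y = pvRootOf p y) ∧
      pvStep p x ∈ p.keys ∧ pvRootOf p (pvStep p x) = root := by
  have hxnr : ¬ pvIsRoot p x := fun hr => hne (by rw [hr, ← hroot, pvRootOf_of_isRoot hr])
  obtain ⟨hg, _⟩ := not_isRoot_get? hxnr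
  have hxroot : x ≠ root := by
    intro hxr
    apply hxnr
    have := pvRootOf_isRoot h x
    rwa [hroot, ← hxr] at this
  have hstepmem : pvStep p x ∈ p.keys := h.1 _ _ hg
  have hsroot : pvRootOf p (pvStep p x) = root := by rw [pvRootOf_step h, hroot]
  have hkeys : (p.insert x root).keys = p.keys :=
    PySem.Dict.keys_insert_of_contains p root ((PySem.Dict.contains_iff_mem_keys p x).2 hx)
  have hrootmem : root ∈ p.keys := by rw [← hroot]; exact pvRootOf_mem_keys h hx
  -- roots of p other than x stay roots in p'
  have hroots' : ∀ r, pvIsRoot p r → pvIsRoot (p.insert x root) r := by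
    intro r hr
    have hrx : r ≠ x := fun hrx => hxnr (hrx ▸ hr)
    rw [pvIsRoot, pvStep_insert, if_neg hrx]
    exact hr
  -- forest invariant for p'
  have hforest' : pvForest (p.insert x root) := by
    obtain ⟨hcl, rank, hrank⟩ := h
    constructor
    · intro k v hgv
      by_cases hk : k = x
      · subst hk
        rw [PySem.Dict.get?_insert_self] at hgv
        cases hgv
        rw [hkeys]; exact hrootmem
      · rw [PySem.Dict.get?_insert_of_ne p root hk] at hgv
        rw [hkeys]; exact hcl _ _ hgv
    · -- rank of root is below rank of x: rank root ≤ rank (step x) < rank x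
      have hrankiter : ∀ (n : Nat) (y : String), rank ((pvStep p)^[n] y) ≤ rank y := by
        intro n
        induction n with
        | zero => intro y; rfl
        | succ m ih =>
          intro y
          rw [Function.iterate_succ_apply]
          refine le_trans (ih (pvStep p y)) ?_
          by_cases hy : pvIsRoot p y
          · rw [hy]
          · obtain ⟨hgy, _⟩ := not_isRoot_get? hy
            exact le_of_lt (hrank _ _ hgy hy)
      have hrr : rank root < rank x := by
        have h1 : rank root ≤ rank (pvStep p x) := by
          rw [← hsroot, pvRootOf]
          exact hrankiter _ _
        exact lt_of_le_of_lt h1 (hrank _ _ hg hxnr)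
      refine ⟨rank, fun k v hgv hnv => ?_⟩
      by_cases hk : k = x
      · subst hk
        rw [PySem.Dict.get?_insert_self] at hgv
        cases hgv
        exact hrr
      · exact hrank _ _ (by rwa [PySem.Dict.get?_insert_of_ne p root hk] at hgv) hnv
  refine ⟨hkeys, hforest', ?_, hstepmem, hsroot⟩
  -- root preservation
  have hreach : ∀ (n : Nat) (z r' : String), (pvStep p)^[n] z = r' → pvIsRoot p r' →
      ∃ m, (pvStep (p.insert x root))^[m] z = r' := by
    intro n
    induction n with
    | zero => exact fun z r' hz _ => ⟨0, hz⟩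
    | succ m ih =>
      intro z r' hz hr'
      by_cases hzx : z = x
      · subst hzx
        have : r' = root := by rw [← hroot]; exact (pvRootOf_reaches h hz hr').symm
        subst this
        exact ⟨1, by simp [pvStep_insert]⟩
      · rw [Function.iterate_succ_apply] at hz
        obtain ⟨m', hm'⟩ := ih (pvStep p z) r' hz hr'
        exact ⟨m' + 1, by rw [Function.iterate_succ_apply, pvStep_insert, if_neg hzx]; exact hm'⟩
  intro y
  obtain ⟨m, hm⟩ := hreach p.keys.length y (pvRootOf p y) rfl (pvRootOf_isRoot h y)
  exact pvRootOf_reaches hforest' hm (hroots' _ (pvRootOf_isRoot h y))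

theorem pvCompressLoop_spec (f : Nat) :
    ∀ (p : PySem.Dict String String) (x root : String), pvForest p → x ∈ p.keys →
      pvRootOf p x = root →
      (pvCompressLoop p f x root).keys = p.keys ∧ pvForest (pvCompressLoop p f x root) ∧
        ∀ y, pvRootOf (pvCompressLoop p f x root) y = pvRootOf p y := by
  induction f with
  | zero => exact fun p x root _ _ _ => ⟨rfl, by assumption, fun _ => rfl⟩
  | succ f ih =>
    intro p x root h hx hroot
    rw [pvCompressLoop]
    by_cases hc : p.getD x x = root
    · rw [if_pos hc]
      exact ⟨rfl, h, fun _ => rfl⟩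
    · rw [if_neg hc]
      obtain ⟨hkeys, hforest', hpres, hmem, hsroot⟩ :=
        pvCompress_step h hx hroot (show pvStep p x ≠ root from hc)
      obtain ⟨k2, f2, p2⟩ := ih (p.insert x root) (p.getD x x) root hforest'
        (by rw [hkeys]; exact hmem)
        (by rw [hpres]; exact hsroot)
      exact ⟨by rw [k2, hkeys], f2, fun y => by rw [p2 y, hpres y]⟩

theorem pvMerge_spec {p : PySem.Dict String String} {ra rb : String} (h : pvForest p)
    (hra : pvIsRoot p ra) (hrb : pvIsRoot p rb) (hne : ra ≠ rb)
    (hka : ra ∈ p.keys) (hkb : rb ∈ p.keys) :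
    (p.insert rb ra).keys = p.keys ∧ pvForest (p.insert rb ra) ∧
      ∀ y, pvRootOf (p.insert rb ra) y =
        if pvRootOf p y = rb then ra else pvRootOf p y := by
  have hkeys : (p.insert rb ra).keys = p.keys :=
    PySem.Dict.keys_insert_of_contains p ra ((PySem.Dict.contains_iff_mem_keys p rb).2 hkb)
  have hrootra : pvRootOf p ra = ra := pvRootOf_of_isRoot hra
  have hrootrb : pvRootOf p rb = rb := pvRootOf_of_isRoot hrb
  have hedge : ∀ k v, p.get? k = some v → pvRootOf p v = pvRootOf p k := by
    intro k v hg
    rw [← pvStep_of_get?_eq_some hg, pvRootOf_step h]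
  have hforest' : pvForest (p.insert rb ra) := by
    obtain ⟨hcl, rank, hrank⟩ := h
    constructor
    · intro k v hg
      by_cases hk : k = rb
      · subst hk
        rw [PySem.Dict.get?_insert_self] at hg
        cases hg
        rw [hkeys]; exact hka
      · rw [PySem.Dict.get?_insert_of_ne p ra hk] at hg
        rw [hkeys]; exact hcl _ _ hg
    · refine ⟨fun c => if pvRootOf p c = rb then rank c + (rank ra + 1) else rank c,
        fun k v hg hnv => ?_⟩
      dsimp only
      by_cases hk : k = rb
      · subst hk
        rw [PySem.Dict.get?_insert_self] at hg
        cases hg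
        rw [if_pos hrootrb, if_neg (by rw [hrootra]; exact hne)]
        omega
      · rw [PySem.Dict.get?_insert_of_ne p ra hk] at hg
        have hrv := hedge _ _ hg
        have hlt := hrank _ _ hg hnv
        by_cases hr : pvRootOf p k = rb
        · rw [if_pos (by rw [hrv]; exact hr), if_pos hr]; omega
        · rw [if_neg (by rw [hrv]; exact hr), if_neg hr]; omega
  have hstep' : ∀ z, z ≠ rb → pvStep (p.insert rb ra) z = pvStep p z := by
    intro z hz
    rw [pvStep_insert, if_neg hz]
  have hsteprb : pvStep (p.insert rb ra) rb = ra := by simp [pvStep_insert]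
  have hroots' : ∀ r, pvIsRoot p r → r ≠ rb → pvIsRoot (p.insert rb ra) r := by
    intro r hr hrneq
    rw [pvIsRoot, hstep' r hrneq]
    exact hr
  have hA : ∀ (n : Nat) (z r' : String), (pvStep p)^[n] z = r' → pvIsRoot p r' → r' ≠ rb →
      (pvStep (p.insert rb ra))^[n] z = r' := by
    intro n
    induction n with
    | zero => exact fun z r' hz _ _ => hz
    | succ m ih =>
      intro z r' hz hr' hner'
      by_cases hzb : z = rb
      · subst hzb
        rw [Function.iterate_fixed hrb] at hz
        exact absurd hz.symm hner'
      · rw [Function.iterate_succ_apply] at hz ⊢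
        rw [hstep' z hzb]
        exact ih _ _ hz hr' hner'
  have hB : ∀ (n : Nat) (z : String), (pvStep p)^[n] z = rb →
      ∃ m, (pvStep (p.insert rb ra))^[m] z = ra := by
    intro n
    induction n with
    | zero =>
      intro z hz
      have hz' : z = rb := hz
      exact ⟨1, by rw [Function.iterate_one, hz', hsteprb]⟩
    | succ m ih =>
      intro z hz
      by_cases hzb : z = rb
      · exact ⟨1, by rw [Function.iterate_one, hzb, hsteprb]⟩

      · rw [Function.iterate_succ_apply] at hz
        obtain ⟨m', hm'⟩ := ih _ hz
        exact ⟨m' + 1, by rw [Function.iterate_succ_apply, hstep' z hzb]; exact hm'⟩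
  refine ⟨hkeys, hforest', fun y => ?_⟩
  by_cases hc : pvRootOf p y = rb
  · rw [if_pos hc]
    obtain ⟨m, hm⟩ := hB p.keys.length y hc
    exact pvRootOf_reaches hforest' hm (hroots' ra hra hne)
  · rw [if_neg hc]
    exact pvRootOf_reaches hforest'
      (hA p.keys.length y (pvRootOf p y) rfl (pvRootOf_isRoot h y) hc)
      (hroots' _ (pvRootOf_isRoot h y) hc)

theorem pvFind_spec (p : PySem.Dict String String) (x : String) (h : pvForest p) :
    pvForest (pvFind p x).1 ∧
      (pvFind p x).1.keys = (if x ∈ p.keys then p.keys else p.keys ++ [x]) ∧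
      (∀ y, pvRootOf (pvFind p x).1 y = pvRootOf p y) ∧
      (pvFind p x).2 = pvRootOf p x := by
  by_cases hmem : x ∈ p.keys
  · have hcont : p.contains x = true := (PySem.Dict.contains_iff_mem_keys p x).2 hmem
    have hfind : pvFind p x =
        (pvCompressLoop p p.keys.length x (pvFindRootLoop p p.keys.length x),
          pvFindRootLoop p p.keys.length x) := by
      rw [pvFind]
      simp only [hcont, if_true]
    have hrootval : pvFindRootLoop p p.keys.length x = pvRootOf p x := by
      rw [pvFindRootLoop_eq_iterate]; rfl
    obtain ⟨hk, hf, hp⟩ := pvCompressLoop_spec p.keys.length p x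
      (pvFindRootLoop p p.keys.length x) h hmem hrootval.symm
    rw [hfind]
    exact ⟨hf, by rw [hk, if_pos hmem], hp, hrootval⟩
  · have hcont : p.contains x = false := by
      rcases hc : p.contains x with _ | _
      · rfl
      · exact absurd ((PySem.Dict.contains_iff_mem_keys p x).1 hc) hmem
    have hfind : pvFind p x =
        (pvCompressLoop (p.insert x x) (p.insert x x).keys.length x
            (pvFindRootLoop (p.insert x x) (p.insert x x).keys.length x),
          pvFindRootLoop (p.insert x x) (p.insert x x).keys.length x) := by
      rw [pvFind]
      simp only [hcont, Bool.false_eq_true, if_false]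
    have hf1 : pvForest (p.insert x x) := pvFresh_forest hmem h
    have hx1 : x ∈ (p.insert x x).keys := by
      rw [pvFresh_keys hmem]; exact List.mem_append_right _ (List.mem_singleton.2 rfl)
    have hrootval : pvFindRootLoop (p.insert x x) (p.insert x x).keys.length x
        = pvRootOf p x := by
      rw [pvFindRootLoop_eq_iterate]
      exact pvFresh_rootOf hmem h x
    obtain ⟨hk, hf, hp⟩ := pvCompressLoop_spec (p.insert x x).keys.length (p.insert x x) x
      (pvFindRootLoop (p.insert x x) (p.insert x x).keys.length x) hf1 hx1
      (by rw [hrootval]; exact pvFresh_rootOf hmem h x)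
    rw [hfind]
    refine ⟨hf, by rw [hk, pvFresh_keys hmem, if_neg hmem], fun y => ?_, hrootval⟩
    rw [hp y, pvFresh_rootOf hmem h y]

theorem pvNotMem_contains {κ ν : Type} [BEq κ] [LawfulBEq κ] (d : PySem.Dict κ ν) {x : κ}
    (h : x ∉ d.keys) : d.contains x = false := by
  rcases hc : d.contains x with _ | _
  · rfl
  · exact absurd ((PySem.Dict.contains_iff_mem_keys d x).1 hc) h

-- the simulation relation: the leader map stores exactly the union-find roots,
-- over the same keys in the same first-seen order
def pvRel (p L : PySem.Dict String String) : Prop :=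
  pvForest p ∧ p.keys = L.keys ∧ p.keys.Nodup ∧ ∀ y, pvRootOf p y = L.getD y y

theorem pvRel_setdefault {p L : PySem.Dict String String} (hrel : pvRel p L) (x : String) :
    pvRel (pvFind p x).1 (L.setdefault x x) ∧ (pvFind p x).2 = (L.get? x).getD x := by
  obtain ⟨hf, hkeys, hnd, hroot⟩ := hrel
  obtain ⟨hf', hk', hp', hv'⟩ := pvFind_spec p x hf
  have hgetD : (L.get? x).getD x = L.getD x x := (PySem.Dict.getD_eq_get?_getD L x x).symm
  by_cases hm : x ∈ p.keys
  · have hLc : L.contains x = true :=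
      (PySem.Dict.contains_iff_mem_keys L x).2 (hkeys ▸ hm)
    rw [PySem.Dict.setdefault_of_contains L x hLc]
    refine ⟨⟨hf', ?_, ?_, fun y => by rw [hp' y, hroot y]⟩, ?_⟩
    · rw [hk', if_pos hm, hkeys]
    · rw [hk', if_pos hm]; exact hnd
    · rw [hv', hgetD, hroot x]
  · have hLm : x ∉ L.keys := hkeys ▸ hm
    have hLc : L.contains x = false := pvNotMem_contains L hLm
    rw [PySem.Dict.setdefault_of_not_contains L x hLc]
    have hLk : (L.insert x x).keys = L.keys ++ [x] :=
      PySem.Dict.keys_insert_of_not_contains L x hLc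
    refine ⟨⟨hf', ?_, ?_, fun y => ?_⟩, ?_⟩
    · rw [hk', if_neg hm, hkeys, hLk]
    · rw [hk', if_neg hm]
      simp only [List.nodup_append, List.nodup_singleton, true_and]
      refine ⟨hnd, ?_⟩
      intro a ha z hz
      rw [List.mem_singleton] at hz
      subst hz
      intro haz
      exact hm (haz ▸ ha)
    · rw [hp' y, PySem.Dict.getD_insert]
      by_cases hy : y = x
      · subst hy
        rw [if_pos rfl]
        exact pvRootOf_of_not_mem hm
      · rw [if_neg hy]
        exact hroot y
    · rw [hv', hgetD]
      rw [PySem.Dict.getD_of_get?_eq_none L x ((PySem.Dict.get?_eq_none_iff_not_mem_keys L x).2 hLm)]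
      exact pvRootOf_of_not_mem hm

theorem pvRelabel_spec (M : PySem.Dict String String) (hnd : M.keys.Nodup) (la lb : String) :
    ((M.items.map (fun kv => (kv.1, if kv.2 = lb then la else kv.2))).foldl
        (fun d kv => d.insert kv.1 kv.2) PySem.Dict.empty).items
      = M.items.map (fun kv => (kv.1, if kv.2 = lb then la else kv.2)) ∧
    ((M.items.map (fun kv => (kv.1, if kv.2 = lb then la else kv.2))).foldl
        (fun d kv => d.insert kv.1 kv.2) PySem.Dict.empty).keys = M.keys ∧
    (∀ y, y ∈ M.keys →
      ((M.items.map (fun kv => (kv.1, if kv.2 = lb then la else kv.2))).foldl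
        (fun d kv => d.insert kv.1 kv.2) PySem.Dict.empty).getD y y
        = if M.getD y y = lb then la else M.getD y y) ∧
    (∀ y, y ∉ M.keys →
      ((M.items.map (fun kv => (kv.1, if kv.2 = lb then la else kv.2))).foldl
        (fun d kv => d.insert kv.1 kv.2) PySem.Dict.empty).getD y y = y) := by
  set f : String × String → String × String := fun kv => (kv.1, if kv.2 = lb then la else kv.2) with hf
  set l := M.items.map f with hl
  have hfst : l.map Prod.fst = M.keys := by
    simp only [PySem.Dict.keys, hl, List.map_map]
    rfl
  have hitems : (l.foldl (fun d kv => d.insert kv.1 kv.2) PySem.Dict.empty).items = l := by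
    have := PySem.Dict.items_foldl_insert_fresh l Prod.fst Prod.snd PySem.Dict.empty
      (fun a _ => PySem.Dict.contains_empty a.1) (by rw [hfst]; exact hnd)
    simpa using this
  have hkeys : (l.foldl (fun d kv => d.insert kv.1 kv.2) PySem.Dict.empty).keys = M.keys := by
    have : (l.foldl (fun d kv => d.insert kv.1 kv.2) PySem.Dict.empty).keys
        = (l.foldl (fun d kv => d.insert kv.1 kv.2) PySem.Dict.empty).items.map Prod.fst := rfl
    rw [this, hitems]
    exact hfst
  refine ⟨hitems, hkeys, fun y hy => ?_, fun y hy => ?_⟩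
  · rcases hg : M.get? y with _ | v
    · exact absurd ((PySem.Dict.get?_eq_none_iff_not_mem_keys M y).1 hg) (by simpa using hy)
    · have hvitem : (y, v) ∈ M.items := PySem.Dict.mem_items_of_get?_eq_some M hg
      have hmem' : (y, if v = lb then la else v) ∈
          (l.foldl (fun d kv => d.insert kv.1 kv.2) PySem.Dict.empty).items := by
        rw [hitems, hl]
        exact List.mem_map_of_mem hvitem
      rw [PySem.Dict.getD_of_mem_items _ hmem' (by rw [hkeys]; exact hnd) y]
      rw [PySem.Dict.getD_of_get?_eq_some M y hg]
  · rw [PySem.Dict.getD_of_not_contains _ y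
      (pvNotMem_contains _ (by rw [hkeys]; exact hy))]

theorem pvRel_union {p L : PySem.Dict String String} (hrel : pvRel p L) (a b : String) :
    pvRel (pvUnion p a b) (pvStepB L a b) := by
  obtain ⟨hrel1, hva⟩ := pvRel_setdefault hrel a
  obtain ⟨hrel2, hvb⟩ := pvRel_setdefault hrel1 b
  rw [pvUnion, pvStepB]
  rw [← hva, ← hvb]
  set f1 := pvFind p a with hf1def
  set f2 := pvFind f1.1 b with hf2def
  by_cases hc : f1.2 = f2.2
  · rw [if_neg (by simpa using hc), if_neg (by simpa using hc)]
    exact hrel2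
  · rw [if_pos hc, if_pos hc]
    obtain ⟨hforest2, hkeys2, hnd2, hroot2⟩ := hrel2
    -- a and b are keys of f2.1, their roots are f1.2 and f2.2
    obtain ⟨hfp, hkp, hpp, hvp⟩ := pvFind_spec p a hrel.1
    obtain ⟨hf2', hk2', hp2', hv2'⟩ := pvFind_spec f1.1 b hfp
    have hamem : a ∈ f1.1.keys := by
      rw [hkp]
      by_cases hm : a ∈ p.keys
      · rwa [if_pos hm]
      · rw [if_neg hm]; exact List.mem_append_right _ (List.mem_singleton.2 rfl)
    have hamem2 : a ∈ f2.1.keys := by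
      rw [hk2']
      by_cases hm : b ∈ f1.1.keys
      · rwa [if_pos hm]
      · rw [if_neg hm]; exact List.mem_append_left _ hamem
    have hbmem2 : b ∈ f2.1.keys := by
      rw [hk2']
      by_cases hm : b ∈ f1.1.keys
      · rwa [if_pos hm]
      · rw [if_neg hm]; exact List.mem_append_right _ (List.mem_singleton.2 rfl)
    have hroota : pvRootOf f2.1 a = f1.2 := by
      rw [hp2' a, hpp a]
      exact hvp.symm
    have hrootb : pvRootOf f2.1 b = f2.2 := by rw [hv2', hp2' b]
    have hisra : pvIsRoot f2.1 f1.2 := hroota ▸ pvRootOf_isRoot hforest2 a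
    have hisrb : pvIsRoot f2.1 f2.2 := hrootb ▸ pvRootOf_isRoot hforest2 b
    have hramem : f1.2 ∈ f2.1.keys := hroota ▸ pvRootOf_mem_keys hforest2 hamem2
    have hrbmem : f2.2 ∈ f2.1.keys := hrootb ▸ pvRootOf_mem_keys hforest2 hbmem2
    obtain ⟨hmk, hmf, hmr⟩ :=
      pvMerge_spec hforest2 hisra hisrb hc hramem hrbmem
    -- the relabelled dict: same keys, values relabelled lb ↦ la
    have hrlb := pvRelabel_spec (L.setdefault a a |>.setdefault b b) (hkeys2 ▸ hnd2) f1.2 f2.2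
    obtain ⟨hri, hrk, hrmem, hrnot⟩ := hrlb
    refine ⟨hmf, ?_, ?_, fun y => ?_⟩
    · rw [hmk, hkeys2, hrk]
    · rw [hmk]; exact hnd2
    · rw [hmr y]
      by_cases hy : y ∈ (L.setdefault a a |>.setdefault b b).keys
      · rw [hrmem y hy, ← hroot2 y]
      · rw [hrnot y hy]
        rw [pvRootOf_of_not_mem (fun hm => hy (hkeys2 ▸ hm))]
        rw [if_neg (fun hh : y = f2.2 => hy (hkeys2 ▸ (hh ▸ hrbmem)))]

theorem pvRel_empty : pvRel PySem.Dict.empty PySem.Dict.empty := by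
  refine ⟨⟨fun k v hg => ?_, fun _ => 0, fun k v hg => ?_⟩, ?_, ?_, fun y => ?_⟩
  · rw [PySem.Dict.get?_empty] at hg; cases hg
  · rw [PySem.Dict.get?_empty] at hg; cases hg
  · rfl
  · simp [PySem.Dict.keys_empty]
  · rw [pvRootOf, PySem.Dict.keys_empty, List.length_nil, Function.iterate_zero_apply,
      PySem.Dict.getD_empty]

theorem pvRel_foldl (l : List (String × String)) :
    ∀ (p L : PySem.Dict String String), pvRel p L →
      pvRel (l.foldl (fun p ab => pvUnion p ab.1 ab.2) p)
        (l.foldl (fun L ab => pvStepB L ab.1 ab.2) L) := by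
  induction l with
  | nil => exact fun p L h => h
  | cons ab l ih =>
    intro p L h
    exact ih _ _ (pvRel_union h ab.1 ab.2)

theorem pvAssign_foldl (L : PySem.Dict String String) :
    ∀ (cs : List String) (p : PySem.Dict String String)
      (r2g : PySem.Dict String Int) (c2g : PySem.Dict String Int)
      (g2m : PySem.Dict Int (PySem.Set String)) (gid : Int),
      pvForest p → (∀ c ∈ cs, c ∈ p.keys) → (∀ y, pvRootOf p y = L.getD y y) →
      (cs.foldl pvAssignA (p, r2g, c2g, g2m, gid)).2 =
        (cs.map (fun c => (c, L.getD c c))).foldl pvAssignB (r2g, c2g, g2m, gid) := by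
  intro cs
  induction cs with
  | nil => intro p r2g c2g g2m gid _ _ _; rfl
  | cons c cs ih =>
    intro p r2g c2g g2m gid hf hcs hroot
    obtain ⟨hf', hk', hp', hv'⟩ := pvFind_spec p c hf
    have hcmem : c ∈ p.keys := hcs c (List.mem_cons_self)
    have hkeq : (pvFind p c).1.keys = p.keys := by rw [hk', if_pos hcmem]
    have hstep : pvAssignA (p, r2g, c2g, g2m, gid) c =
        ((pvFind p c).1,
          pvAssignB (r2g, c2g, g2m, gid) (c, L.getD c c)) := by
      have hr : (pvFind p c).2 = L.getD c c := by rw [hv', hroot c]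
      simp only [pvAssignA, pvAssignB, hr]
    rw [List.foldl_cons, List.map_cons, List.foldl_cons, hstep]
    exact ih (pvFind p c).1 _ _ _ _ hf'
      (fun c' hc' => by rw [hkeq]; exact hcs c' (List.mem_cons_of_mem c hc'))
      (fun y => by rw [hp' y, hroot y])

theorem pvBuild_eq (pairs : List (String × String)) :
    build_union_find_groups pairs = build_union_find_groups_alt pairs := by
  rw [build_union_find_groups, build_union_find_groups_alt]
  obtain ⟨hf, hkeys, hnd, hroot⟩ :=
    pvRel_foldl pairs PySem.Dict.empty PySem.Dict.empty pvRel_empty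
  set pf := pairs.foldl (fun p ab => pvUnion p ab.1 ab.2) PySem.Dict.empty with hpf
  set Lf := pairs.foldl (fun L ab => pvStepB L ab.1 ab.2) PySem.Dict.empty with hLf
  have hfold := pvAssign_foldl Lf pf.keys pf PySem.Dict.empty PySem.Dict.empty
    PySem.Dict.empty 0 hf (fun c hc => hc) hroot
  have hitems : pf.keys.map (fun c => (c, Lf.getD c c)) = Lf.items := by
    rw [hkeys]
    rw [PySem.Dict.items_eq_map_keys Lf (hkeys ▸ hnd) "x"]
    apply List.map_congr_left
    intro k hk
    rcases hg : Lf.get? k with _ | v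
    · exact absurd ((PySem.Dict.get?_eq_none_iff_not_mem_keys Lf k).1 hg) (by simpa using hk)
    · rw [PySem.Dict.getD_of_get?_eq_some Lf k hg, PySem.Dict.getD_of_get?_eq_some Lf "x" hg]
  rw [hitems] at hfold
  rw [hfold]

-- ===== VERDICT (by name: the statement is the Claim_ definition above) =====
theorem build_union_find_groups_spec : Claim_equal_build_union_find_groups := by
  intro pairs _
  exact pvBuild_eq pairs
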